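-- pv_equiv track=rewrite | github.com/giuliop/AdvenfOfCode2023 | python/day1.py | word_indexes
-- ===== SOURCE A (Python) =====
-- NUMBER_WORDS = {
--     'zero': 0, 'one': 1, 'two': 2, 'three': 3, 'four': 4,
--     'five': 5, 'six': 6, 'seven': 7, 'eight': 8, 'nine': 9
-- }
--
-- def word_indexes(line):
--     # return a dictionary of all the positions of the keys in NUMBER_WORDS
--     # in line, using the values as keys, e.g., {2: [0, 4], 1: [1]}
--     indexes = {}
--     for word, num in NUMBER_WORDS.items():
--         index = line.find(word)
--         if index == -1:
--             continue
--         indexes[num] = []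
--         while index != -1:
--             indexes[num].append(index)
--             index = line.find(word, index + 1)
--     return indexes
-- ===== SOURCE B (Python) =====
-- NUMBER_WORDS = {
--     'zero': 0, 'one': 1, 'two': 2, 'three': 3, 'four': 4,
--     'five': 5, 'six': 6, 'seven': 7, 'eight': 8, 'nine': 9
-- }
--
-- def word_indexes(line):
--     # One left-to-right scan: at each position record which number-words start there,
--     # then group the recorded positions by number in NUMBER_WORDS order.
--     matches = [(num, i)
--                for i in range(len(line))
--                for word, num in NUMBER_WORDS.items()
--                if line.startswith(word, i)]
--     result = {}
--     for word, num in NUMBER_WORDS.items():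
--         pos = [i for n, i in matches if n == num]
--         if pos:
--             result[num] = pos
--     return result
-- ===== Notes on version B (the rewrite author's own statement) =====
-- stated objective: alternative
-- what changed: Replaces the ten independent find-chain scans that append into the dict with a single left-to-right positional scan collecting (num, position) matches, followed by a grouping pass over NUMBER_WORDS.
import Mathlib
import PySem

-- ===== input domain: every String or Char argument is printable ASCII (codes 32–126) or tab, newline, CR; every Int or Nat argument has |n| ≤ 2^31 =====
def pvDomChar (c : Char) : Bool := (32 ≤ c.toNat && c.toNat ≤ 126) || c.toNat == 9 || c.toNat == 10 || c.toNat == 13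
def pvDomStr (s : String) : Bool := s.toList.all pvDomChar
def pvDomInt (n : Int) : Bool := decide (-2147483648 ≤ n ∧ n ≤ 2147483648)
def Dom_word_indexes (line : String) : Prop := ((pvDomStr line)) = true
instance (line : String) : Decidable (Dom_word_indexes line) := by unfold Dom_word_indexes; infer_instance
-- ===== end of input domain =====

-- B replaces A's ten find-chain scans by one left-to-right positional scan plus a grouping pass (alternative decomposition, same result).

-- ===== PORT A =====
def NUMBER_WORDS : List (String × Int) :=
  [("zero", 0), ("one", 1), ("two", 2), ("three", 3), ("four", 4),
   ("five", 5), ("six", 6), ("seven", 7), ("eight", 8), ("nine", 9)]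

-- A's inner while loop: append index into indexes[num], advance index = line.find(word, index+1).
-- fuel = line length + 1 is a totality guard only; the loop's index strictly increases and is bounded by the length.
def pvWhileA (line w : String) (num : Int) (fuel : Nat) (index : Int)
    (d : PySem.Dict Int (List Int)) : PySem.Dict Int (List Int) :=
  match fuel with
  | 0 => d
  | fuel + 1 =>
    if index = -1 then d
    else pvWhileA line w num fuel (PySem.Str.findFrom line w (index + 1) none)
           (d.modify num [] (· ++ [index]))

def word_indexes (line : String) : List (Int × List Int) :=
  (NUMBER_WORDS.foldl (fun d p =>
      let index := PySem.Str.find line p.1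
      if index = -1 then d
      else pvWhileA line p.1 p.2 (line.toList.length + 1) index (d.insert p.2 ([] : List Int)))
    PySem.Dict.empty).items

-- ===== PORT B =====
-- line.startswith(word, i) for 0 ≤ i is exactly Chars.startswith on the dropped suffix (hand port; PySem has no start parameter).
def word_indexes_alt (line : String) : List (Int × List Int) :=
  let pvMatches : List (Int × Int) :=
    (PySem.List.pyRange 0 (PySem.Str.len line) 1).foldl (fun acc i =>
      NUMBER_WORDS.foldl (fun acc p =>
        if PySem.Chars.startswith (line.toList.drop i.toNat) p.1.toList then acc ++ [(p.2, i)]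
        else acc) acc) []
  (NUMBER_WORDS.foldl (fun res p =>
      let pos := (pvMatches.filter (fun m => m.1 == p.2)).map (·.2)
      if pos ≠ [] then res.insert p.2 pos else res) PySem.Dict.empty).items

-- ===== PRECONDITION & SPEC =====
def Spec_word_indexes (line : String) (out : List (Int × List Int)) : Prop := out = word_indexes_alt line
instance (line : String) (out : List (Int × List Int)) : Decidable (Spec_word_indexes line out) := by unfold Spec_word_indexes; infer_instance

-- ===== CLAIM (what is proved, stated in full; the proofs are below) =====
def Claim_equal_word_indexes : Prop := ∀ (line : String), Dom_word_indexes line → Spec_word_indexes line (word_indexes line)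

-- ===== LEMMAS AND PROOFS =====

theorem pv_filter_ge_congr (P : Nat → Bool) (n a b : Nat) (hab : a ≤ b)
    (h : ∀ i, a ≤ i → i < b → P i = false) :
    (List.range n).filter (fun i => decide (a ≤ i) && P i)
      = (List.range n).filter (fun i => decide (b ≤ i) && P i) := by
  apply List.filter_congr
  intro x _
  by_cases hbx : b ≤ x
  · have : a ≤ x := le_trans hab hbx
    simp [this, hbx]
  · by_cases hax : a ≤ x
    · simp [hax, hbx, h x hax (by omega)]
    · simp [hax, hbx]

theorem pv_filter_ge_cons (P : Nat → Bool) (n a : Nat) (han : a < n) (hPa : P a = true) :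
    (List.range n).filter (fun i => decide (a ≤ i) && P i)
      = a :: (List.range n).filter (fun i => decide (a + 1 ≤ i) && P i) := by
  induction n with
  | zero => omega
  | succ n ih =>
    rw [List.range_succ, List.filter_append, List.filter_append]
    by_cases h : a < n
    · rw [ih h]
      rw [List.cons_append]
      have he : List.filter (fun i => decide (a ≤ i) && P i) [n]
          = List.filter (fun i => decide (a + 1 ≤ i) && P i) [n] := by
        simp only [List.filter_cons, List.filter_nil]
        have h1 : a ≤ n := le_of_lt h
        have h2 : a + 1 ≤ n := h
        simp [h1, h2]
      rw [he]
    · have ha : a = n := by omega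
      subst ha
      have h1 : (List.range a).filter (fun i => decide (a ≤ i) && P i) = [] := by
        apply List.filter_eq_nil_iff.mpr
        intro i hi
        simp at hi ⊢
        omega
      have h2 : (List.range a).filter (fun i => decide (a + 1 ≤ i) && P i) = [] := by
        apply List.filter_eq_nil_iff.mpr
        intro i hi
        simp at hi ⊢
        omega
      rw [h1, h2]
      simp [hPa]

def pvOcc (s w : List Char) (k : Nat) : List Int :=
  ((List.range s.length).filter (fun i => decide (k ≤ i) && PySem.Chars.startswith (s.drop i) w)).map
    (fun i => Int.ofNat i)

def pvChainL (s w : List Char) (fuel : Nat) (idx : Int) : List Int :=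
  match fuel with
  | 0 => []
  | fuel + 1 =>
    if idx = -1 then []
    else idx :: pvChainL s w fuel (PySem.Chars.findFrom s w (idx + 1) none)

theorem pv_prefix_drop_infix {w s : List Char} {k i : Nat} (hk : k ≤ i) (h : w <+: s.drop i) :
    w <:+: s.drop k := by
  have he : s.drop i = (s.drop k).drop (i - k) := by
    rw [List.drop_drop]; congr 1; try omega
  rw [he] at h
  exact h.isInfix.trans (List.drop_suffix _ _).isInfix

theorem pvOcc_nil_iff (s w : List Char) (hw : w ≠ []) :
    PySem.Chars.find s w = -1 ↔ pvOcc s w 0 = [] := by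
  unfold pvOcc
  rw [List.map_eq_nil_iff, List.filter_eq_nil_iff]
  constructor
  · intro h i hi hpred
    simp only [Bool.and_eq_true, decide_eq_true_eq] at hpred
    have hpre := (PySem.Chars.startswith_iff _ _).mp hpred.2
    have hinf : w <:+: s := by
      have := pv_prefix_drop_infix (Nat.zero_le i) hpre
      simpa using this
    exact (PySem.Chars.find_eq_neg_one_iff s w).mp h hinf
  · intro h
    by_contra hne
    have hinf : w <:+: s := (PySem.Chars.find_ne_neg_one_iff s w).mp hne
    have hex : ∃ j, w <+: s.drop j :=
      (PySem.Chars.exists_prefix_drop_iff_isIn w s).mpr ((PySem.Chars.isIn_iff_infix w s).mpr hinf)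
    obtain ⟨j, hj⟩ := hex
    have hjlt : j < s.length := by
      by_contra hge
      have : s.drop j = [] := List.drop_eq_nil_of_le (by omega)
      rw [this] at hj
      exact hw (List.prefix_nil.mp hj)
    exact h j (List.mem_range.mpr hjlt)
      (by simp [PySem.Chars.startswith_iff, hj])

theorem pvChainL_eq (s w : List Char) (hw : w ≠ []) :
    ∀ (fuel : Nat) (k : Nat), k ≤ s.length → s.length + 1 ≤ fuel + k →
    pvChainL s w fuel (PySem.Chars.findFrom s w (k : Int) none) = pvOcc s w k := by
  intro fuel
  induction fuel with
  | zero => intro k hk hf; omega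
  | succ fuel ih =>
    intro k hk hf
    rw [PySem.Chars.findFrom_natCast s w k hk]
    by_cases h : PySem.Chars.find (s.drop k) w = -1
    · rw [if_pos h]
      have : pvOcc s w k = [] := by
        unfold pvOcc
        rw [List.map_eq_nil_iff, List.filter_eq_nil_iff]
        intro i hi hpred
        simp only [Bool.and_eq_true, decide_eq_true_eq] at hpred
        exact (PySem.Chars.find_eq_neg_one_iff _ w).mp h
          (pv_prefix_drop_infix hpred.1 ((PySem.Chars.startswith_iff _ _).mp hpred.2))
      rw [this, pvChainL]
      simp
    · rw [if_neg h]
      have hm0 : 0 ≤ PySem.Chars.find (s.drop k) w := by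
        rw [PySem.Chars.find_nonneg_iff]
        exact (PySem.Chars.find_ne_neg_one_iff _ w).mp h
      obtain ⟨hpre, hmin⟩ := PySem.Chars.find_spec (s := s.drop k) (sub := w) hm0
      set m : Nat := (PySem.Chars.find (s.drop k) w).toNat with hmdef
      set a : Nat := k + m with hadef
      have hcast : (k : Int) + PySem.Chars.find (s.drop k) w = (a : Int) := by
        omega
      have hdrop : (s.drop k).drop m = s.drop a := by
        rw [List.drop_drop]
      rw [hdrop] at hpre
      have halt : a < s.length := by
        by_contra hge
        have : s.drop a = [] := List.drop_eq_nil_of_le (by omega)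
        rw [this] at hpre
        exact hw (List.prefix_nil.mp hpre)
      rw [hcast, pvChainL]
      have hne : (a : Int) ≠ -1 := by omega
      rw [if_neg hne]
      have hsucc : (a : Int) + 1 = ((a + 1 : Nat) : Int) := by omega
      rw [hsucc, ih (a + 1) (by omega) (by omega)]
      have hcongr : pvOcc s w k = pvOcc s w a := by
        unfold pvOcc
        rw [pv_filter_ge_congr _ s.length k a (by omega)]
        intro i hki hia
        by_contra hP
        have hP' : PySem.Chars.startswith (s.drop i) w = true := by
          revert hP; cases PySem.Chars.startswith (s.drop i) w <;> simp
        have hpre' : w <+: (s.drop k).drop (i - k) := by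
          have he : (s.drop k).drop (i - k) = s.drop i := by
            rw [List.drop_drop]; congr 1; omega
          rw [he]
          exact (PySem.Chars.startswith_iff _ _).mp hP'
        exact hmin (i - k) (by omega) hpre'
      rw [hcongr]
      unfold pvOcc
      rw [pv_filter_ge_cons _ s.length a halt ((PySem.Chars.startswith_iff _ _).mpr hpre)]
      simp

theorem pvWhileA_insert (line w : String) (num : Int) (fuel : Nat) :
    ∀ (idx : Int) (v : List Int) (d : PySem.Dict Int (List Int)),
    pvWhileA line w num fuel idx (d.insert num v)
      = d.insert num (v ++ pvChainL line.toList w.toList fuel idx) := by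
  induction fuel with
  | zero => intro idx v d; simp [pvWhileA, pvChainL]
  | succ fuel ih =>
    intro idx v d
    by_cases h : idx = -1
    · simp [pvWhileA, pvChainL, h]
    · rw [pvWhileA, pvChainL, if_neg h, if_neg h]
      have hm : (d.insert num v).modify num [] (· ++ [idx]) = d.insert num (v ++ [idx]) := by
        simp [PySem.Dict.modify, PySem.Dict.getD_insert_self, PySem.Dict.insert_insert_self]
      rw [hm, ih, PySem.Str.findFrom_eq, List.append_assoc, List.singleton_append]

theorem pv_fold_ins_items (F : String × Int → List Int) :
    ∀ (ps : List (String × Int)) (d : PySem.Dict Int (List Int)),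
    (ps.map Prod.snd).Nodup → (∀ p ∈ ps, d.contains p.2 = false) →
    (ps.foldl (fun d p => if F p = [] then d else d.insert p.2 (F p)) d).items
      = d.items ++ (ps.filter (fun p => !decide (F p = []))).map (fun p => (p.2, F p)) := by
  intro ps
  induction ps with
  | nil => intro d _ _; simp
  | cons p ps ih =>
    intro d hnd hfresh
    rw [List.map_cons, List.nodup_cons] at hnd
    rw [List.foldl_cons]
    by_cases hF : F p = []
    · rw [if_pos hF, ih d hnd.2 (fun q hq => hfresh q (List.mem_cons_of_mem p hq))]
      simp [hF]
    · rw [if_neg hF]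
      have hfresh' : ∀ q ∈ ps, (d.insert p.2 (F p)).contains q.2 = false := by
        intro q hq
        rw [PySem.Dict.contains_insert]
        have hne : q.2 ≠ p.2 := by
          intro he
          exact hnd.1 (he ▸ List.mem_map_of_mem hq)
        simp [hne, hfresh q (List.mem_cons_of_mem p hq)]
      rw [ih (d.insert p.2 (F p)) hnd.2 hfresh',
        PySem.Dict.items_insert_of_not_contains (h := hfresh p (List.mem_cons_self))]
      simp [hF]

def pvT (line : String) : List (Int × List Int) :=
  (NUMBER_WORDS.filter (fun p => !decide (pvOcc line.toList p.1.toList 0 = []))).map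
    (fun p => (p.2, pvOcc line.toList p.1.toList 0))

theorem pv_words_ne_nil : ∀ p ∈ NUMBER_WORDS, p.1.toList ≠ [] := by decide

theorem pv_words_nodup : (NUMBER_WORDS.map Prod.snd).Nodup := by decide

theorem A_eq_T (line : String) : word_indexes line = pvT line := by
  unfold word_indexes
  rw [PySem.List.foldl_congr_mem
    (g := fun d p => if pvOcc line.toList p.1.toList 0 = [] then d
                     else d.insert p.2 (pvOcc line.toList p.1.toList 0))]
  · rw [pv_fold_ins_items _ NUMBER_WORDS PySem.Dict.empty pv_words_nodup (by intro q _; simp)]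
    simp [pvT, PySem.Dict.empty]
  · intro d p hp
    have hw := pv_words_ne_nil p hp
    simp only [PySem.Str.find_eq]
    by_cases hidx : PySem.Chars.find line.toList p.1.toList = -1
    · rw [if_pos hidx, if_pos ((pvOcc_nil_iff _ _ hw).mp hidx)]
    · rw [if_neg hidx, if_neg (fun hocc => hidx ((pvOcc_nil_iff _ _ hw).mpr hocc))]
      rw [pvWhileA_insert]
      have h0 : PySem.Chars.find line.toList p.1.toList
          = PySem.Chars.findFrom line.toList p.1.toList ((0 : Nat) : Int) none := by
        simp [PySem.Chars.findFrom_zero]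
      rw [h0, pvChainL_eq line.toList p.1.toList hw (line.toList.length + 1) 0
        (Nat.zero_le _) (by omega)]
      simp

theorem pv_filter_snd_unique (num : Int) (Q : String × Int → Bool) :
    ∀ (ps : List (String × Int)) (w : String), (ps.map Prod.snd).Nodup → (w, num) ∈ ps →
    ps.filter (fun q => (q.2 == num) && Q q) = if Q (w, num) then [(w, num)] else [] := by
  intro ps
  induction ps with
  | nil => intro w _ hmem; cases hmem
  | cons p ps ih =>
    intro w hnd hmem
    rw [List.map_cons, List.nodup_cons] at hnd
    rcases List.mem_cons.mp hmem with hp | hp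
    · subst hp
      have htail : ps.filter (fun q => (q.2 == num) && Q q) = [] := by
        apply List.filter_eq_nil_iff.mpr
        intro q hq
        have : q.2 ≠ num := by
          intro he
          apply hnd.1
          rw [← he]
          exact List.mem_map.mpr ⟨q, hq, rfl⟩
        simp [this]
      rw [List.filter_cons, htail]
      by_cases hQ : Q (w, num) <;> simp [hQ]
    · have hne : p.2 ≠ num := by
        intro he
        have : num ∈ ps.map Prod.snd := by
          have := List.mem_map_of_mem (f := Prod.snd) hp
          simpa using this
        exact hnd.1 (he ▸ this)
      have hfalse : ((p.2 == num) && Q p) = false := by simp [hne]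
      rw [List.filter_cons, hfalse]
      simp only [Bool.false_eq_true, if_false]
      exact ih w hnd.2 hp

theorem pv_flatMap_if {α : Type} (P : Nat → Bool) (f : Nat → α) :
    ∀ (l : List Nat), l.flatMap (fun k => if P k then [f k] else []) = (l.filter P).map f := by
  intro l
  induction l with
  | nil => rfl
  | cons x l ih =>
    rw [List.flatMap_cons, List.filter_cons, ih]
    by_cases h : P x <;> simp [h]

theorem pv_pos_eq (line : String) (p : String × Int) (hp : p ∈ NUMBER_WORDS) :
    (((PySem.List.pyRange 0 (PySem.Str.len line) 1).flatMap (fun i =>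
        (NUMBER_WORDS.filter (fun q => PySem.Chars.startswith (line.toList.drop i.toNat) q.1.toList)).map
          (fun q => (q.2, i)))).filter (fun m => m.1 == p.2)).map (·.2)
      = pvOcc line.toList p.1.toList 0 := by
  obtain ⟨w, num⟩ := p
  rw [List.filter_flatMap]
  have hper : ∀ (i : Int),
      ((NUMBER_WORDS.filter (fun q => PySem.Chars.startswith (line.toList.drop i.toNat) q.1.toList)).map
          (fun q => (q.2, i))).filter (fun m => m.1 == num)
        = if PySem.Chars.startswith (line.toList.drop i.toNat) w.toList then [(num, i)] else [] := by
    intro i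
    rw [List.filter_map, List.filter_filter]
    have hcomp : ((fun (m : Int × Int) => m.1 == num) ∘ (fun (q : String × Int) => (q.2, i)))
        = fun q => q.2 == num := rfl
    rw [hcomp, pv_filter_snd_unique num _ NUMBER_WORDS w pv_words_nodup hp]
    by_cases h : PySem.Chars.startswith (line.toList.drop i.toNat) w.toList <;> simp [h]
  simp only [hper]
  rw [List.map_flatMap]
  have hlen : PySem.Str.len line = (line.toList.length : Int) := by
    simp [PySem.Str.len]
  rw [PySem.List.pyRange_one, hlen]
  have htn : ((line.toList.length : Int) - 0).toNat = line.toList.length := by omega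
  rw [htn, List.flatMap_map]
  simp only [zero_add, Int.toNat_natCast,
    apply_ite (List.map (fun (x : Int × Int) => x.2)), List.map_cons, List.map_nil]
  rw [pv_flatMap_if]
  unfold pvOcc
  simp only [Int.ofNat_eq_natCast]
  have hfil : (List.range line.toList.length).filter
        (fun a => PySem.Chars.startswith (List.drop a line.toList) w.toList)
      = (List.range line.toList.length).filter
        (fun i => decide (0 ≤ i) && PySem.Chars.startswith (List.drop i line.toList) w.toList) := by
    refine List.filter_congr ?_
    intro x _
    simp
  rw [hfil]

theorem B_eq_T (line : String) : word_indexes_alt line = pvT line := by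
  unfold word_indexes_alt
  have hM : (PySem.List.pyRange 0 (PySem.Str.len line) 1).foldl (fun acc i =>
        NUMBER_WORDS.foldl (fun acc p =>
          if PySem.Chars.startswith (line.toList.drop i.toNat) p.1.toList then acc ++ [(p.2, i)]
          else acc) acc) []
      = (PySem.List.pyRange 0 (PySem.Str.len line) 1).flatMap (fun i =>
        (NUMBER_WORDS.filter (fun q => PySem.Chars.startswith (line.toList.drop i.toNat) q.1.toList)).map
          (fun q => (q.2, i))) := by
    rw [PySem.List.foldl_congr_mem (g := fun acc i => acc ++
      (NUMBER_WORDS.filter (fun q => PySem.Chars.startswith (line.toList.drop i.toNat) q.1.toList)).map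
        (fun q => (q.2, i)))]
    · rw [PySem.List.foldl_append_eq_flatMap]
      simp
    · intro acc i _
      exact PySem.List.foldl_append_if _ _ _ _
  rw [hM]
  dsimp only
  rw [PySem.List.foldl_congr_mem
    (g := fun res p => if pvOcc line.toList p.1.toList 0 = [] then res
                       else res.insert p.2 (pvOcc line.toList p.1.toList 0))]
  · rw [pv_fold_ins_items _ NUMBER_WORDS PySem.Dict.empty pv_words_nodup (by intro q _; simp)]
    simp [pvT, PySem.Dict.empty]
  · intro res p hp
    rw [pv_pos_eq line p hp]
    by_cases hocc : pvOcc line.toList p.1.toList 0 = [] <;> simp [hocc]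

-- ===== VERDICT (by name: the statement is the Claim_ definition above) =====
theorem word_indexes_spec : Claim_equal_word_indexes := by
  intro line _
  unfold Spec_word_indexes
  rw [A_eq_T, B_eq_T]
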